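-- pv_equiv track=rewrite | github.com/RWCS-LTD/benchmark_hours | seasonal_aggregator.py | _contiguous_intervals_from_minutes
-- ===== SOURCE A (Python) =====
-- def _contiguous_intervals_from_minutes(mins: set[int]) -> list[tuple[int, int]]:
--     """Return list of (start, end) half-open intervals from a set of absolute minutes.
--     Empty set → []. Used for overlap display + tolerance filtering."""
--     if not mins:
--         return []
--     sorted_mins = sorted(mins)
--     intervals: list[tuple[int, int]] = []
--     run_s = sorted_mins[0]
--     prev = run_s
--     for m in sorted_mins[1:]:
--         if m == prev + 1:
--             prev = m
--         else:
--             intervals.append((run_s, prev + 1))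
--             run_s = m
--             prev = m
--     intervals.append((run_s, prev + 1))
--     return intervals
-- ===== SOURCE B (Python) =====
-- def _contiguous_intervals_from_minutes(mins: set[int]) -> list[tuple[int, int]]:
--     """Boundary-detection reformulation: a minute m starts an interval iff m-1 is
--     absent, and ends one iff m+1 is absent; pair the sorted boundary lists."""
--     sm = sorted(mins)
--     s = set(mins)
--     starts = [m for m in sm if m - 1 not in s]
--     ends = [m for m in sm if m + 1 not in s]
--     return [(a, b + 1) for a, b in zip(starts, ends)]
-- ===== Notes on version B (the rewrite author's own statement) =====
-- stated objective: alternative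
-- what changed: Replaces the single merge loop with running (run_s, prev) state by boundary detection: interval starts are minutes m with m-1 absent, ends are minutes m with m+1 absent, paired by zip; Pre_ asks the list to encode a valid set (no duplicates).
import Mathlib
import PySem

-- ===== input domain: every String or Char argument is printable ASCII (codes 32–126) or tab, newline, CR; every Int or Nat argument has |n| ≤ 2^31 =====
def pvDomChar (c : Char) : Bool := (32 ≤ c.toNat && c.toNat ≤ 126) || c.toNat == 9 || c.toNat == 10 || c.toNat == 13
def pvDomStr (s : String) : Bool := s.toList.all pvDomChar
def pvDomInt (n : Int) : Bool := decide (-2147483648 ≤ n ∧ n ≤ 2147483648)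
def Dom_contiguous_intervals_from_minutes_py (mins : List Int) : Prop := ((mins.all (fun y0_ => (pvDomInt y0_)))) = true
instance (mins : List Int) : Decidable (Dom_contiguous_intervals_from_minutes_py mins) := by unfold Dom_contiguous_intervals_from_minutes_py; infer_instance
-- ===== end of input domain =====

-- B replaces A's running merge loop by boundary detection (starts = m with m-1 absent,
-- ends = m with m+1 absent, zipped); alternative decomposition, same asymptotic cost.

-- ===== PORT A =====
-- the for-loop over sorted_mins[1:] with state (intervals, run_s, prev)
def pvGoA : List Int → List (Int × Int) → Int → Int → List (Int × Int)
  | [], intervals, run_s, prev => intervals ++ [(run_s, prev + 1)]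
  | m :: rest, intervals, run_s, prev =>
    if m = prev + 1 then pvGoA rest intervals run_s m
    else pvGoA rest (intervals ++ [(run_s, prev + 1)]) m m

def contiguous_intervals_from_minutes_py (mins : List Int) : List (Int × Int) :=
  if mins = [] then []
  else
    match PySem.List.sorted mins (fun x => x) false with
    | [] => []  -- unreachable: sorted of a nonempty list is nonempty
    | r :: rest => pvGoA rest [] r r

-- ===== PORT B =====
def contiguous_intervals_from_minutes_py_alt (mins : List Int) : List (Int × Int) :=
  let sm := PySem.List.sorted mins (fun x => x) false
  let s := PySem.Set.ofList mins
  let starts := sm.filter (fun m => !decide ((m - 1) ∈ s))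
  let ends := sm.filter (fun m => !decide ((m + 1) ∈ s))
  (starts.zip ends).map (fun p => (p.1, p.2 + 1))

-- ===== PRECONDITION & SPEC =====
-- The Python argument is a set; its List encoding holds distinct elements, so Pre_
-- excludes lists with duplicates (not valid set encodings), on which A's duplicated
-- intervals are an artefact of re-sorting the duplicates.
def Pre_contiguous_intervals_from_minutes_py (mins : List Int) : Prop := mins.Nodup
instance (mins : List Int) : Decidable (Pre_contiguous_intervals_from_minutes_py mins) := by unfold Pre_contiguous_intervals_from_minutes_py; infer_instance
def pvWitness_contiguous_intervals_from_minutes_py : List Int := [3, 1, 2, 7]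
def Spec_contiguous_intervals_from_minutes_py (mins : List Int) (out : List (Int × Int)) : Prop := out = contiguous_intervals_from_minutes_py_alt mins
instance (mins : List Int) (out : List (Int × Int)) : Decidable (Spec_contiguous_intervals_from_minutes_py mins out) := by unfold Spec_contiguous_intervals_from_minutes_py; infer_instance

-- ===== CLAIM (what is proved, stated in full; the proofs are below) =====
def Claim_equal_contiguous_intervals_from_minutes_py : Prop := ∀ (mins : List Int), Dom_contiguous_intervals_from_minutes_py mins → Pre_contiguous_intervals_from_minutes_py mins → Spec_contiguous_intervals_from_minutes_py mins (contiguous_intervals_from_minutes_py mins)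

-- ===== LEMMAS AND PROOFS =====

-- the merge loop without its accumulator
def pvRunsFrom (s p : Int) : List Int → List (Int × Int)
  | [] => [(s, p + 1)]
  | m :: rest => if m = p + 1 then pvRunsFrom s m rest else (s, p + 1) :: pvRunsFrom m m rest

theorem pvGoA_eq (rest : List Int) : ∀ (acc : List (Int × Int)) (s p : Int),
    pvGoA rest acc s p = acc ++ pvRunsFrom s p rest := by
  induction rest with
  | nil => intro acc s p; simp [pvGoA, pvRunsFrom]
  | cons m t ih =>
    intro acc s p
    simp only [pvGoA, pvRunsFrom]
    split_ifs with h
    · exact ih acc s m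
    · rw [ih (acc ++ [(s, p + 1)]) m m]; simp

-- the first interval's start is the only use of s
theorem pvRunsFrom_shift (rest : List Int) : ∀ (p s s' : Int),
    pvRunsFrom s p rest = (s, ((pvRunsFrom s' p rest).headI).2) :: (pvRunsFrom s' p rest).tail := by
  induction rest with
  | nil => intro p s s'; simp [pvRunsFrom]
  | cons m t ih =>
    intro p s s'
    simp only [pvRunsFrom]
    split_ifs with h
    · exact ih m s s'
    · simp

theorem pvRunsFrom_ne_nil : ∀ (rest : List Int) (s p : Int), pvRunsFrom s p rest ≠ [] := by
  intro rest
  induction rest with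
  | nil => intro s p; simp [pvRunsFrom]
  | cons m t ih =>
    intro s p
    simp only [pvRunsFrom]
    split_ifs with h
    · exact ih s m
    · simp

theorem pv_not_mem_of_forall_lt {c : Int} {L : List Int} (h : ∀ x ∈ L, c < x) : c ∉ L :=
  fun hc => lt_irrefl c (h c hc)

-- B-side computation, with membership tested against the list itself
def pvB (L : List Int) : List (Int × Int) :=
  ((L.filter fun m => !decide ((m - 1) ∈ L)).zip (L.filter fun m => !decide ((m + 1) ∈ L))).map
    fun p => (p.1, p.2 + 1)

def pvF : List Int → List (Int × Int)
  | [] => []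
  | r :: rest => pvRunsFrom r r rest

theorem pv_main (L : List Int) (hL : L.Pairwise (· < ·)) : pvB L = pvF L := by
  induction L with
  | nil => simp [pvB, pvF]
  | cons a L' ih =>
    match L' with
    | [] =>
      simp only [pvB, pvF, pvRunsFrom, List.mem_singleton]
      have h1 : (a - 1 == a) = false := by simp
      have h2 : (a + 1 == a) = false := by simp
      simp [List.filter]
    | b :: t =>
      rw [List.pairwise_cons] at hL
      obtain ⟨ha, hbt⟩ := hL
      have hab : a < b := ha b (by simp)
      have hat : ∀ x ∈ t, a < x := fun x hx => ha x (by simp [hx])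
      have hbtlt : ∀ x ∈ t, b < x := (List.pairwise_cons.mp hbt).1
      have ih' := ih hbt
      simp only [pvF] at ih' ⊢
      -- a is always a start: a - 1 ∉ a :: b :: t
      have hs_a : (a - 1) ∉ a :: b :: t := by
        apply pv_not_mem_of_forall_lt
        intro x hx
        rcases List.mem_cons.mp hx with h | hx
        · omega
        · rcases List.mem_cons.mp hx with h | hx
          · omega
          · have := hat x hx; omega
      -- membership of x±1 for x ∈ t never hits a
      have htpm : ∀ x ∈ t, ((x - 1) ∈ a :: b :: t ↔ (x - 1) ∈ b :: t) ∧
          ((x + 1) ∈ a :: b :: t ↔ (x + 1) ∈ b :: t) := by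
        intro x hx
        have hbx := hbtlt x hx
        refine ⟨⟨fun h => ?_, fun h => List.mem_cons_of_mem _ h⟩,
               ⟨fun h => ?_, fun h => List.mem_cons_of_mem _ h⟩⟩
        · rcases List.mem_cons.mp h with h | h
          · omega
          · exact h
        · rcases List.mem_cons.mp h with h | h
          · omega
          · exact h
      have hbp : ((b + 1) ∈ a :: b :: t ↔ (b + 1) ∈ b :: t) := by
        refine ⟨fun h => ?_, fun h => List.mem_cons_of_mem _ h⟩
        rcases List.mem_cons.mp h with h | h
        · omega
        · exact h
      by_cases hb : b = a + 1
      · -- run continues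
        -- starts: a kept, b dropped (b-1 = a), t filtered as in b::t
        have hfil_t_s : (t.filter fun m => !decide ((m - 1) ∈ a :: b :: t))
            = t.filter fun m => !decide ((m - 1) ∈ b :: t) := by
          apply List.filter_congr
          intro x hx
          simp [(htpm x hx).1]
        have hfil_t_e : (t.filter fun m => !decide ((m + 1) ∈ a :: b :: t))
            = t.filter fun m => !decide ((m + 1) ∈ b :: t) := by
          apply List.filter_congr
          intro x hx
          simp [(htpm x hx).2]
        have hstarts : ((a :: b :: t).filter fun m => !decide ((m - 1) ∈ a :: b :: t))
            = a :: (t.filter fun m => !decide ((m - 1) ∈ b :: t)) := by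
          simp only [List.filter_cons]
          rw [hfil_t_s]
          have h1 : (!decide ((a - 1) ∈ a :: b :: t)) = true := by simp [hs_a]
          have h2 : (!decide ((b - 1) ∈ a :: b :: t)) = false := by
            simp only [Bool.not_eq_false', decide_eq_true_eq]
            have : b - 1 = a := by omega
            simp [this]
          rw [h1, h2]
          simp
        have hends : ((a :: b :: t).filter fun m => !decide ((m + 1) ∈ a :: b :: t))
            = (b :: t).filter fun m => !decide ((m + 1) ∈ b :: t) := by
          simp only [List.filter_cons]
          rw [hfil_t_e]
          have h1 : (!decide ((a + 1) ∈ a :: b :: t)) = false := by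
            simp only [Bool.not_eq_false', decide_eq_true_eq]
            have : a + 1 = b := by omega
            simp [this]
          have h2 : (!decide ((b + 1) ∈ a :: b :: t)) = (!decide ((b + 1) ∈ b :: t)) := by
            simp [hbp]
          rw [h1, h2]
          simp
        -- starts of b::t = b :: (filter of t)
        have hstarts' : ((b :: t).filter fun m => !decide ((m - 1) ∈ b :: t))
            = b :: (t.filter fun m => !decide ((m - 1) ∈ b :: t)) := by
          simp only [List.filter_cons]
          have hbm : (b - 1) ∉ b :: t := by
            apply pv_not_mem_of_forall_lt
            intro x hx
            rcases List.mem_cons.mp hx with h | hx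
            · omega
            · have := hbtlt x hx; omega
          simp [hbm]
        -- IH gives the pairing
        have hgoal : pvRunsFrom a a (b :: t) = pvRunsFrom a b t := by
          simp only [pvRunsFrom]; rw [if_pos hb]
        have hBa : pvB (a :: b :: t) =
            ((a :: (t.filter fun m => !decide ((m - 1) ∈ b :: t))).zip
              ((b :: t).filter fun m => !decide ((m + 1) ∈ b :: t))).map (fun p => (p.1, p.2 + 1)) := by
          rw [pvB, hstarts, hends]
        have hBbt : pvB (b :: t) =
            ((b :: (t.filter fun m => !decide ((m - 1) ∈ b :: t))).zip
              ((b :: t).filter fun m => !decide ((m + 1) ∈ b :: t))).map (fun p => (p.1, p.2 + 1)) := by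
          rw [pvB, hstarts']
        show pvB (a :: b :: t) = pvRunsFrom a a (b :: t)
        cases hE : (b :: t).filter (fun m => !decide ((m + 1) ∈ b :: t)) with
        | nil =>
          exfalso
          rw [hBbt, hE] at ih'
          simp only [List.zip_nil_right, List.map_nil] at ih'
          exact pvRunsFrom_ne_nil t b b ih'.symm
        | cons e E' =>
          rw [hBbt, hE, List.zip_cons_cons, List.map_cons] at ih'
          rw [hgoal, pvRunsFrom_shift t b a b, ← ih']
          rw [hBa, hE, List.zip_cons_cons, List.map_cons]
          simp
      · -- gap: a closes a singleton run
        have hgap : a + 1 < b := by omega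
        have hmem2 : ∀ x ∈ b :: t, ((x - 1) ∈ a :: b :: t ↔ (x - 1) ∈ b :: t) ∧
            ((x + 1) ∈ a :: b :: t ↔ (x + 1) ∈ b :: t) := by
          intro x hx
          have hxb : b ≤ x := by
            rcases List.mem_cons.mp hx with h | h
            · omega
            · have := hbtlt x h; omega
          refine ⟨⟨fun h => ?_, fun h => List.mem_cons_of_mem _ h⟩,
                 ⟨fun h => ?_, fun h => List.mem_cons_of_mem _ h⟩⟩
          · rcases List.mem_cons.mp h with h | h
            · omega
            · exact h
          · rcases List.mem_cons.mp h with h | h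
            · omega
            · exact h
        have hna : (a + 1) ∉ a :: b :: t := by
          intro h
          rcases List.mem_cons.mp h with h | h
          · omega
          · rcases List.mem_cons.mp h with h | h
            · omega
            · have := hbtlt _ h; omega
        have hfil2_s : ((b :: t).filter fun m => !decide ((m - 1) ∈ a :: b :: t))
            = (b :: t).filter fun m => !decide ((m - 1) ∈ b :: t) :=
          List.filter_congr (fun x hx => by simp only [(hmem2 x hx).1])
        have hfil2_e : ((b :: t).filter fun m => !decide ((m + 1) ∈ a :: b :: t))
            = (b :: t).filter fun m => !decide ((m + 1) ∈ b :: t) :=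
          List.filter_congr (fun x hx => by simp only [(hmem2 x hx).2])
        have hstarts2 : ((a :: b :: t).filter fun m => !decide ((m - 1) ∈ a :: b :: t))
            = a :: ((b :: t).filter fun m => !decide ((m - 1) ∈ b :: t)) := by
          rw [List.filter_cons, hfil2_s]
          simp [hs_a]
        have hends2 : ((a :: b :: t).filter fun m => !decide ((m + 1) ∈ a :: b :: t))
            = a :: ((b :: t).filter fun m => !decide ((m + 1) ∈ b :: t)) := by
          rw [List.filter_cons, hfil2_e]
          simp [hna]
        have hgoal : pvRunsFrom a a (b :: t) = (a, a + 1) :: pvRunsFrom b b t := by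
          simp only [pvRunsFrom]; rw [if_neg hb]
        show pvB (a :: b :: t) = pvRunsFrom a a (b :: t)
        rw [hgoal, pvB, hstarts2, hends2, List.zip_cons_cons, List.map_cons, ← ih']
        rfl

theorem pv_alt_eq_pvB (mins : List Int) :
    contiguous_intervals_from_minutes_py_alt mins = pvB (PySem.List.sorted mins (fun x => x) false) := by
  have hperm := PySem.List.sorted_perm (xs := mins) (key := fun x => x) (rev := false)
  have h1 : ((PySem.List.sorted mins (fun x => x) false).filter
        fun m => !decide ((m - 1) ∈ PySem.Set.ofList mins))
      = (PySem.List.sorted mins (fun x => x) false).filter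
        fun m => !decide ((m - 1) ∈ PySem.List.sorted mins (fun x => x) false) :=
    List.filter_congr (fun x _ => by simp only [PySem.Set.mem_ofList, ← hperm.mem_iff])
  have h2 : ((PySem.List.sorted mins (fun x => x) false).filter
        fun m => !decide ((m + 1) ∈ PySem.Set.ofList mins))
      = (PySem.List.sorted mins (fun x => x) false).filter
        fun m => !decide ((m + 1) ∈ PySem.List.sorted mins (fun x => x) false) :=
    List.filter_congr (fun x _ => by simp only [PySem.Set.mem_ofList, ← hperm.mem_iff])
  unfold contiguous_intervals_from_minutes_py_alt pvB
  dsimp only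
  rw [h1, h2]

theorem contiguous_intervals_from_minutes_py_spec : Claim_equal_contiguous_intervals_from_minutes_py := by
  intro mins _ hpre
  unfold Spec_contiguous_intervals_from_minutes_py
  by_cases hmins : mins = []
  · subst hmins
    simp [contiguous_intervals_from_minutes_py, contiguous_intervals_from_minutes_py_alt,
      PySem.List.sorted]
  · have hperm := PySem.List.sorted_perm (xs := mins) (key := fun x => x) (rev := false)
    have hle : (PySem.List.sorted mins (fun x => x) false).Pairwise
        (fun a b => (fun x => x) a ≤ (fun x => x) b) := PySem.List.sorted_pairwise mins (fun x => x)
    have hnd : (PySem.List.sorted mins (fun x => x) false).Nodup := hperm.nodup_iff.mpr hpre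
    have hlt : (PySem.List.sorted mins (fun x => x) false).Pairwise (· < ·) := by
      have := hle.and hnd
      exact this.imp (fun h => lt_of_le_of_ne h.1 h.2)
    rw [pv_alt_eq_pvB, pv_main _ hlt]
    cases hL : PySem.List.sorted mins (fun x => x) false with
    | nil =>
      rw [PySem.List.sorted_eq_nil_iff] at hL
      exact absurd hL hmins
    | cons r rest =>
      simp only [contiguous_intervals_from_minutes_py, if_neg hmins, hL, pvF]
      rw [pvGoA_eq]
      simp
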